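-- pv_equiv track=rewrite | github.com/zhangxu1233/RMYC2021--automatic-aiming | loneliness.py | analyze_samples
-- ===== SOURCE A (Python) =====
-- def analyze_samples(six_samples:list):
--     temp_samples=[]
--     max_value=-10000
--     max_list=[]
--     min_value=10000
--     min_list=[]
--     for i in range(len(six_samples)):
--         current=six_samples[i]
--         x1,x2,y1,y2=current[0],current[1],current[2],current[3]
--         if x1>x2 and abs(y1-y2)<=10:
--             if not 0 in current:
--                 temp_samples.append(current)
--                 if x1-x2>max_value:
--                     if max_list!=current:
--                         max_value=x1-x2
--                         max_list=current
--                 if x1-x2<min_value: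
--                     if min_list!=current:
--                         min_value=x1-x2
--                         min_list=current
--     if len(temp_samples)<=2:
--         pass
--     else:
--         if max_list in temp_samples:
--             temp_samples.remove(max_list)
--         if min_list in temp_samples:
--             temp_samples.remove(min_list)
--     return temp_samples
-- ===== SOURCE B (Python) =====
-- def analyze_samples(six_samples: list):
--     temp = []
--     for s in six_samples:
--         x1, x2, y1, y2 = s[0], s[1], s[2], s[3]
--         if x1 > x2 and abs(y1 - y2) <= 10 and 0 not in s:
--             temp.append(s)
--     if len(temp) > 2:
--         mx = max(temp, key=lambda s: s[0] - s[1])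
--         mn = min(temp, key=lambda s: s[0] - s[1])
--         temp.remove(mx)
--         if mn in temp:
--             temp.remove(mn)
--     return temp
-- ===== Notes on version B (the rewrite author's own statement) =====
-- stated objective: simpler
-- what changed: B separates the work into a plain filter pass followed by max/min with a key and two removals, instead of A's fused single pass that threads sentinel-initialised running max/min bookkeeping through the filter loop.
-- intended difference: On inputs where more than two samples pass the filter and every passing sample has s[0]-s[1] >= 10000 (A's min sentinel), A never records a minimum and removes only the max entry, while B removes both the max and the true min entry; B's is the intended 'drop both extremes' behaviour, A's 10000 sentinel is an accident. — e.g. on analyze_samples([[10001, 1, 5, 5], [10002, 1, 5, 5], [10003, 1, 5, 5]]): A returns [[10001, 1, 5, 5], [10002, 1, 5, 5]], B returns [[10002, 1, 5, 5]]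
import Mathlib
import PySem

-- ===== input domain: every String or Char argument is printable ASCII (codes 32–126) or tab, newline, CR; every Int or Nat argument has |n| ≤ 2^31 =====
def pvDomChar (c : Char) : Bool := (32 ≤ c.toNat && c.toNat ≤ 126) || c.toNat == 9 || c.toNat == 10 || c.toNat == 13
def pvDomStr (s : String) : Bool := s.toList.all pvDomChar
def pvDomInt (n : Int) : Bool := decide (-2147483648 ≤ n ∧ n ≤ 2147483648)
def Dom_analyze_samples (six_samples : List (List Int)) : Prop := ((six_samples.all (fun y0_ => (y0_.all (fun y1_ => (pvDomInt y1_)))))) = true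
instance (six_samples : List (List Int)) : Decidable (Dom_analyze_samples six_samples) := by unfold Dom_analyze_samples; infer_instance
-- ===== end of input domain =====

-- B replaces A's fused single-pass max/min bookkeeping by a filter pass followed by
-- key-based max/min and two removals (objective: simpler decomposition; not faster).

-- shared vocabulary (used by both ports and by D_): the Python filter predicate
-- 'x1 > x2 and abs(y1-y2) <= 10 and 0 not in s' and the x1 - x2 difference of a sample
def pvKeep (s : List Int) : Bool :=
  match s with
  | x1 :: x2 :: y1 :: y2 :: _ => decide (x2 < x1) && decide ((y1 - y2).natAbs ≤ 10) && !(s.contains 0)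
  | _ => false
def pvDiff (s : List Int) : Int :=
  match s with
  | x1 :: x2 :: _ => x1 - x2
  | _ => 0

-- ===== PORT A =====
-- one iteration of A's loop body; state = (temp_samples, max_value, max_list, min_value, min_list)
def aStep (st : List (List Int) × Int × List Int × Int × List Int) (current : List Int) :
    List (List Int) × Int × List Int × Int × List Int :=
  match PySem.List.pyGet? current 0, PySem.List.pyGet? current 1,
        PySem.List.pyGet? current 2, PySem.List.pyGet? current 3 with
  | some x1, some x2, some y1, some y2 =>
    match st with
    | (temp, maxv, maxl, minv, minl) =>
      if x2 < x1 ∧ (y1 - y2).natAbs ≤ 10 then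
        if !(current.contains 0) then
          let temp' := temp ++ [current]
          let mp : Int × List Int :=
            if maxv < x1 - x2 then (if maxl ≠ current then (x1 - x2, current) else (maxv, maxl))
            else (maxv, maxl)
          let np : Int × List Int :=
            if x1 - x2 < minv then (if minl ≠ current then (x1 - x2, current) else (minv, minl))
            else (minv, minl)
          (temp', mp.1, mp.2, np.1, np.2)
        else st
      else st
  | _, _, _, _ => st
def analyze_samples (six_samples : List (List Int)) : List (List Int) :=
  let st := six_samples.foldl aStep ([], -10000, [], 10000, [])
  let temp := st.1
  let maxl := st.2.2.1
  let minl := st.2.2.2.2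
  if temp.length ≤ 2 then temp
  else
    let t1 := if temp.contains maxl then (PySem.List.remove? temp maxl).getD temp else temp
    if t1.contains minl then (PySem.List.remove? t1 minl).getD t1 else t1

-- ===== PORT B =====
def analyze_samples_alt (six_samples : List (List Int)) : List (List Int) :=
  let temp := six_samples.filter pvKeep
  if 2 < temp.length then
    match PySem.List.max? temp pvDiff, PySem.List.min? temp pvDiff with
    | some mx, some mn =>
      let t1 := (PySem.List.remove? temp mx).getD temp
      if t1.contains mn then (PySem.List.remove? t1 mn).getD t1 else t1
    | _, _ => temp
  else temp

-- ===== PRECONDITION & SPEC =====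
-- A indexes s[0]..s[3] of every sample unconditionally, so it raises IndexError on any
-- sample shorter than 4 entries; exactly those inputs are excluded (A returns on all others).
def Pre_analyze_samples (six_samples : List (List Int)) : Prop :=
  ∀ s ∈ six_samples, 4 ≤ s.length
instance (six_samples : List (List Int)) : Decidable (Pre_analyze_samples six_samples) := by
  unfold Pre_analyze_samples; infer_instance

def pvWitness_analyze_samples : List (List Int) := [[2, 1, 3, 4]]

-- On inputs where more than two samples pass the filter and every passing sample has
-- s[0]-s[1] >= 10000 (A's min sentinel), A never records a minimum and removes only the
-- max-difference entry, while B removes both the max and the true min entry; B's is the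
-- intended 'drop both extremes' behaviour, A's 10000 sentinel is an accident.
def D_analyze_samples (six_samples : List (List Int)) : Prop :=
  let kept := six_samples.filter (fun s => decide (4 ≤ s.length ∧ s.tail.headI < s.headI ∧
    (s.tail.tail.headI - s.tail.tail.tail.headI).natAbs ≤ 10 ∧ (0 : Int) ∉ s))
  2 < kept.length ∧ (∀ s ∈ kept, 10000 ≤ s.headI - s.tail.headI) ∧
    ((∃ s ∈ kept, s.headI - s.tail.headI ≠ kept.headI.headI - kept.headI.tail.headI) ∨
      2 ≤ kept.count kept.headI)
instance (six_samples : List (List Int)) : Decidable (D_analyze_samples six_samples) := by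
  unfold D_analyze_samples; infer_instance

def Spec_analyze_samples (six_samples : List (List Int)) (out : List (List Int)) : Prop :=
  ¬ D_analyze_samples six_samples → out = analyze_samples_alt six_samples
instance (six_samples : List (List Int)) (out : List (List Int)) : Decidable (Spec_analyze_samples six_samples out) := by
  unfold Spec_analyze_samples; infer_instance

def pvDiffWitness_analyze_samples : List (List Int) :=
  [[10001, 1, 5, 5], [10002, 1, 5, 5], [10003, 1, 5, 5]]
def pvDiffWitnessOut_analyze_samples : (List (List Int)) × (List (List Int)) :=
  ([[10001, 1, 5, 5], [10002, 1, 5, 5]], [[10002, 1, 5, 5]])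

-- ===== CLAIM (what is proved, stated in full; the proofs are below) =====
def Claim_unchanged_analyze_samples : Prop := ∀ (six_samples : List (List Int)), Dom_analyze_samples six_samples → Pre_analyze_samples six_samples → Spec_analyze_samples six_samples (analyze_samples six_samples)
def Claim_changed_analyze_samples : Prop := Dom_analyze_samples (pvDiffWitness_analyze_samples) ∧ Pre_analyze_samples (pvDiffWitness_analyze_samples) ∧ D_analyze_samples (pvDiffWitness_analyze_samples) ∧ analyze_samples (pvDiffWitness_analyze_samples) = pvDiffWitnessOut_analyze_samples.1 ∧ analyze_samples_alt (pvDiffWitness_analyze_samples) = pvDiffWitnessOut_analyze_samples.2 ∧ pvDiffWitnessOut_analyze_samples.1 ≠ pvDiffWitnessOut_analyze_samples.2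
def Claim_exact_analyze_samples : Prop := ∀ (six_samples : List (List Int)), Dom_analyze_samples six_samples → Pre_analyze_samples six_samples → D_analyze_samples six_samples → analyze_samples six_samples ≠ analyze_samples_alt six_samples

-- ===== LEMMAS AND PROOFS =====
theorem goodb_eq (s : List Int) :
    (decide (4 ≤ s.length ∧ s.tail.headI < s.headI ∧
      (s.tail.tail.headI - s.tail.tail.tail.headI).natAbs ≤ 10 ∧ (0 : Int) ∉ s)) = pvKeep s := by
  rcases s with _|⟨a,_|⟨b,_|⟨c,_|⟨d,t⟩⟩⟩⟩ <;>
    simp [pvKeep, List.headI, List.tail, decide_eq_true_eq] <;> try omega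
  by_cases h1 : b < a <;> by_cases h2 : (c - d).natAbs ≤ 10 <;>
    simp [h1, h2] <;> tauto

theorem d_eq {s : List Int} (h : pvKeep s = true) : s.headI - s.tail.headI = pvDiff s := by
  rcases s with _|⟨a,_|⟨b,t⟩⟩ <;> simp [pvKeep] at h ⊢ <;> rfl

theorem headI_mem_of_ne_nil {l : List (List Int)} (h : l ≠ []) : l.headI ∈ l := by
  rcases l with _ | ⟨a, t⟩
  · exact absurd rfl h
  · simp [List.headI]

theorem D_iff (xs : List (List Int)) : D_analyze_samples xs ↔
    (2 < (xs.filter pvKeep).length ∧ (∀ s ∈ xs.filter pvKeep, 10000 ≤ pvDiff s) ∧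
      ((∃ s ∈ xs.filter pvKeep, pvDiff s ≠ pvDiff (xs.filter pvKeep).headI) ∨
        2 ≤ (xs.filter pvKeep).count (xs.filter pvKeep).headI)) := by
  unfold D_analyze_samples
  have hf : (xs.filter (fun s => decide (4 ≤ s.length ∧ s.tail.headI < s.headI ∧
      (s.tail.tail.headI - s.tail.tail.tail.headI).natAbs ≤ 10 ∧ (0 : Int) ∉ s))) =
      xs.filter pvKeep := by
    have : (fun s : List Int => decide (4 ≤ s.length ∧ s.tail.headI < s.headI ∧
        (s.tail.tail.headI - s.tail.tail.tail.headI).natAbs ≤ 10 ∧ (0 : Int) ∉ s)) = pvKeep :=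
      funext goodb_eq
    rw [this]
  simp only [hf]
  set kept := xs.filter pvKeep with hkept
  have hk : ∀ s ∈ kept, pvKeep s = true := fun s hs => List.of_mem_filter hs
  constructor
  · rintro ⟨h1, h2, h3⟩
    have hne : kept ≠ [] := by intro h; rw [h] at h1; simp at h1
    have hhm : kept.headI ∈ kept := headI_mem_of_ne_nil hne
    refine ⟨h1, fun s hs => by rw [← d_eq (hk s hs)]; exact h2 s hs, ?_⟩
    rcases h3 with ⟨s, hs, hd⟩ | h
    · exact Or.inl ⟨s, hs, by rw [← d_eq (hk s hs), ← d_eq (hk _ hhm)]; exact hd⟩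
    · exact Or.inr h
  · rintro ⟨h1, h2, h3⟩
    have hne : kept ≠ [] := by intro h; rw [h] at h1; simp at h1
    have hhm : kept.headI ∈ kept := headI_mem_of_ne_nil hne
    refine ⟨h1, fun s hs => by rw [d_eq (hk s hs)]; exact h2 s hs, ?_⟩
    rcases h3 with ⟨s, hs, hd⟩ | h
    · exact Or.inl ⟨s, hs, by rw [d_eq (hk s hs), d_eq (hk _ hhm)]; exact hd⟩
    · exact Or.inr h
theorem pvKeep_shape {s : List Int} (h : pvKeep s = true) : 4 ≤ s.length := by
  rcases s with _|⟨a,_|⟨b,_|⟨c,_|⟨d,t⟩⟩⟩⟩ <;> simp [pvKeep] at h ⊢ <;> omega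
theorem pvKeep_diff_pos {s : List Int} (h : pvKeep s = true) : 1 ≤ pvDiff s := by
  rcases s with _|⟨a,_|⟨b,_|⟨c,_|⟨d,t⟩⟩⟩⟩ <;> simp [pvKeep, pvDiff] at h ⊢ <;> omega
def maxA (o : Option (List Int)) (x : List Int) : Option (List Int) :=
  match o with | none => some x | some m => if pvDiff m < pvDiff x then some x else some m
def minA (o : Option (List Int)) (x : List Int) : Option (List Int) :=
  match o with | none => some x | some m => if pvDiff x < pvDiff m then some x else some m
theorem max?_eq_foldl' (l : List (List Int)) : PySem.List.max? l pvDiff = l.foldl maxA none := by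
  unfold PySem.List.max? maxA
  congr 1
  funext o x; cases o <;> rfl
theorem min?_eq_foldl' (l : List (List Int)) : PySem.List.min? l pvDiff = l.foldl minA none := by
  unfold PySem.List.min? minA
  congr 1
  funext o x; cases o <;> rfl
def mstep (p : Int × List Int) (c : List Int) : Int × List Int :=
  if p.1 < pvDiff c then (pvDiff c, c) else p
def nstep (p : Int × List Int) (c : List Int) : Int × List Int :=
  if pvDiff c < p.1 then (pvDiff c, c) else p
theorem foldl_maxA_some : ∀ (t : List (List Int)) (m : List Int),
    t.foldl maxA (some m) = some (t.foldl mstep (pvDiff m, m)).2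
  ∧ (t.foldl mstep (pvDiff m, m)).1 = pvDiff (t.foldl mstep (pvDiff m, m)).2
  ∧ pvDiff m ≤ (t.foldl mstep (pvDiff m, m)).1 := by
  intro t
  induction t with
  | nil => intro m; simp [mstep]
  | cons c t ih =>
    intro m
    by_cases h : pvDiff m < pvDiff c
    · have := ih c
      simpa [maxA, mstep, h] using ⟨this.1, this.2.1, le_trans (le_of_lt h) this.2.2⟩
    · have := ih m
      simpa [maxA, mstep, h] using this
theorem foldl_minA_some : ∀ (t : List (List Int)) (m : List Int),
    t.foldl minA (some m) = some (t.foldl nstep (pvDiff m, m)).2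
  ∧ (t.foldl nstep (pvDiff m, m)).1 = pvDiff (t.foldl nstep (pvDiff m, m)).2
  ∧ (t.foldl nstep (pvDiff m, m)).1 ≤ pvDiff m := by
  intro t
  induction t with
  | nil => intro m; simp [nstep]
  | cons c t ih =>
    intro m
    by_cases h : pvDiff c < pvDiff m
    · have := ih c
      simpa [minA, nstep, h] using ⟨this.1, this.2.1, le_trans this.2.2 (le_of_lt h)⟩
    · have := ih m
      simpa [minA, nstep, h] using this
theorem mstep_fold_of_exists : ∀ (t : List (List Int)) (v : Int) (d : List Int),
    (∃ s ∈ t, v < pvDiff s) →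
    ∃ m, PySem.List.max? t pvDiff = some m ∧ t.foldl mstep (v, d) = (pvDiff m, m) ∧ v < pvDiff m := by
  intro t
  induction t with
  | nil => intro v d h; simp at h
  | cons c t ih =>
    intro v d hex
    rw [max?_eq_foldl']
    by_cases h : v < pvDiff c
    · obtain ⟨h1, h2, h3⟩ := foldl_maxA_some t c
      refine ⟨(t.foldl mstep (pvDiff c, c)).2, ?_, ?_, ?_⟩
      · simpa [List.foldl_cons, maxA] using h1
      · simp [List.foldl_cons, mstep, h, Prod.ext_iff, h2]
      · omega
    · have hex' : ∃ s ∈ t, v < pvDiff s := by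
        rcases hex with ⟨s, hs, hvs⟩
        rcases List.mem_cons.mp hs with rfl | hs'
        · omega
        · exact ⟨s, hs', hvs⟩
      obtain ⟨m, hm, hfold, hlt⟩ := ih v d hex'
      have hexc : ∃ s ∈ t, pvDiff c < pvDiff s :=
        ⟨m, PySem.List.max?_mem hm, by omega⟩
      obtain ⟨m2, hm2, hfold2, hlt2⟩ := ih (pvDiff c) c hexc
      have hmm : m2 = m := by
        have := hm2.symm.trans hm; exact (Option.some.injEq _ _ ▸ this)
      refine ⟨m, ?_, ?_, hlt⟩
      · have h1 := (foldl_maxA_some t c).1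
        rw [max?_eq_foldl'] at hm2
        simp only [List.foldl_cons, maxA]
        rw [h1, hfold2, hmm]
      · simpa [List.foldl_cons, mstep, h] using hfold
theorem nstep_fold_of_exists : ∀ (t : List (List Int)) (v : Int) (d : List Int),
    (∃ s ∈ t, pvDiff s < v) →
    ∃ m, PySem.List.min? t pvDiff = some m ∧ t.foldl nstep (v, d) = (pvDiff m, m) ∧ pvDiff m < v := by
  intro t
  induction t with
  | nil => intro v d h; simp at h
  | cons c t ih =>
    intro v d hex
    rw [min?_eq_foldl']
    by_cases h : pvDiff c < v
    · obtain ⟨h1, h2, h3⟩ := foldl_minA_some t c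
      refine ⟨(t.foldl nstep (pvDiff c, c)).2, ?_, ?_, ?_⟩
      · simpa [List.foldl_cons, minA] using h1
      · simp [List.foldl_cons, nstep, h, Prod.ext_iff, h2]
      · omega
    · have hex' : ∃ s ∈ t, pvDiff s < v := by
        rcases hex with ⟨s, hs, hvs⟩
        rcases List.mem_cons.mp hs with rfl | hs'
        · omega
        · exact ⟨s, hs', hvs⟩
      obtain ⟨m, hm, hfold, hlt⟩ := ih v d hex'
      have hexc : ∃ s ∈ t, pvDiff s < pvDiff c :=
        ⟨m, PySem.List.min?_mem hm, by omega⟩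
      obtain ⟨m2, hm2, hfold2, hlt2⟩ := ih (pvDiff c) c hexc
      have hmm : m2 = m := by
        have := hm2.symm.trans hm; exact (Option.some.injEq _ _ ▸ this)
      refine ⟨m, ?_, ?_, hlt⟩
      · have h1 := (foldl_minA_some t c).1
        simp only [List.foldl_cons, minA]
        rw [h1, hfold2, hmm]
      · simpa [List.foldl_cons, nstep, h] using hfold
theorem nstep_fold_of_all : ∀ (t : List (List Int)) (v : Int) (d : List Int),
    (∀ s ∈ t, v ≤ pvDiff s) → t.foldl nstep (v, d) = (v, d) := by
  intro t
  induction t with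
  | nil => intro v d _; rfl
  | cons c t ih =>
    intro v d hall
    have hc : ¬ pvDiff c < v := not_lt.mpr (hall c (by simp))
    simp only [List.foldl_cons, nstep, hc, if_neg hc]
    exact ih v d (fun s hs => hall s (by simp [hs]))
theorem minA_const : ∀ (t : List (List Int)) (m : List Int),
    (∀ s ∈ t, pvDiff m ≤ pvDiff s) → t.foldl minA (some m) = some m := by
  intro t
  induction t with
  | nil => intro m _; rfl
  | cons c t ih =>
    intro m hall
    have hc : ¬ pvDiff c < pvDiff m := not_lt.mpr (hall c (by simp))
    simp only [List.foldl_cons, minA, if_neg hc]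
    exact ih m (fun s hs => hall s (by simp [hs]))
theorem maxA_const : ∀ (t : List (List Int)) (m : List Int),
    (∀ s ∈ t, pvDiff s ≤ pvDiff m) → t.foldl maxA (some m) = some m := by
  intro t
  induction t with
  | nil => intro m _; rfl
  | cons c t ih =>
    intro m hall
    have hc : ¬ pvDiff m < pvDiff c := not_lt.mpr (hall c (by simp))
    simp only [List.foldl_cons, maxA, if_neg hc]
    exact ih m (fun s hs => hall s (by simp [hs]))
theorem pyGet4_0 (x1 x2 y1 y2 : Int) (r : List Int) :
    PySem.List.pyGet? (x1::x2::y1::y2::r) 0 = some x1 := by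
  rw [show (0:Int) = ((0:Nat):Int) by norm_num, PySem.List.pyGet?_natCast]; simp
theorem pyGet4_1 (x1 x2 y1 y2 : Int) (r : List Int) :
    PySem.List.pyGet? (x1::x2::y1::y2::r) 1 = some x2 := by
  rw [show (1:Int) = ((1:Nat):Int) by norm_num, PySem.List.pyGet?_natCast]; simp
theorem pyGet4_2 (x1 x2 y1 y2 : Int) (r : List Int) :
    PySem.List.pyGet? (x1::x2::y1::y2::r) 2 = some y1 := by
  rw [show (2:Int) = ((2:Nat):Int) by norm_num, PySem.List.pyGet?_natCast]; simp
theorem pyGet4_3 (x1 x2 y1 y2 : Int) (r : List Int) :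
    PySem.List.pyGet? (x1::x2::y1::y2::r) 3 = some y2 := by
  rw [show (3:Int) = ((3:Nat):Int) by norm_num, PySem.List.pyGet?_natCast]; simp
theorem aStep_cons (temp : List (List Int)) (mv : Int) (ml : List Int) (nv : Int) (nl : List Int)
    (x1 x2 y1 y2 : Int) (r : List Int) :
    aStep (temp, mv, ml, nv, nl) (x1 :: x2 :: y1 :: y2 :: r) =
      if x2 < x1 ∧ (y1 - y2).natAbs ≤ 10 then
        if !((x1 :: x2 :: y1 :: y2 :: r).contains 0) then
          (temp ++ [x1 :: x2 :: y1 :: y2 :: r],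
           (if mv < x1 - x2 then (if ml ≠ (x1 :: x2 :: y1 :: y2 :: r) then (x1 - x2, x1 :: x2 :: y1 :: y2 :: r) else (mv, ml)) else (mv, ml)).1,
           (if mv < x1 - x2 then (if ml ≠ (x1 :: x2 :: y1 :: y2 :: r) then (x1 - x2, x1 :: x2 :: y1 :: y2 :: r) else (mv, ml)) else (mv, ml)).2,
           (if x1 - x2 < nv then (if nl ≠ (x1 :: x2 :: y1 :: y2 :: r) then (x1 - x2, x1 :: x2 :: y1 :: y2 :: r) else (nv, nl)) else (nv, nl)).1,
           (if x1 - x2 < nv then (if nl ≠ (x1 :: x2 :: y1 :: y2 :: r) then (x1 - x2, x1 :: x2 :: y1 :: y2 :: r) else (nv, nl)) else (nv, nl)).2)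
        else (temp, mv, ml, nv, nl)
      else (temp, mv, ml, nv, nl) := by
  unfold aStep
  rw [pyGet4_0, pyGet4_1, pyGet4_2, pyGet4_3]
theorem loop_char : ∀ (xs : List (List Int)) (temp : List (List Int)) (mv : Int) (ml : List Int)
    (nv : Int) (nl : List Int),
    (∀ s ∈ xs, 4 ≤ s.length) →
    ((ml = [] ∧ mv = -10000) ∨ (pvKeep ml = true ∧ mv = pvDiff ml)) →
    ((nl = [] ∧ nv = 10000) ∨ (pvKeep nl = true ∧ nv = pvDiff nl)) →
    xs.foldl aStep (temp, mv, ml, nv, nl) =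
      (temp ++ xs.filter pvKeep,
       ((xs.filter pvKeep).foldl mstep (mv, ml)).1, ((xs.filter pvKeep).foldl mstep (mv, ml)).2,
       ((xs.filter pvKeep).foldl nstep (nv, nl)).1, ((xs.filter pvKeep).foldl nstep (nv, nl)).2) := by
  intro xs
  induction xs with
  | nil => intro temp mv ml nv nl _ _ _; simp
  | cons a xs ih =>
    intro temp mv ml nv nl hlen hinvM hinvN
    have ha4 : 4 ≤ a.length := hlen a (by simp)
    have hlen' : ∀ s ∈ xs, 4 ≤ s.length := fun s hs => hlen s (by simp [hs])
    rcases a with _|⟨x1,_|⟨x2,_|⟨y1,_|⟨y2,r⟩⟩⟩⟩ <;> simp at ha4 <;> try omega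
    simp only [List.foldl_cons, aStep_cons]
    set a := x1 :: x2 :: y1 :: y2 :: r with ha
    by_cases hcond : x2 < x1 ∧ (y1 - y2).natAbs ≤ 10
    · by_cases hcont : a.contains 0
      · have hk : pvKeep a = false := by
          show (decide (x2 < x1) && decide ((y1 - y2).natAbs ≤ 10) && !(a.contains 0)) = false
          simp [hcond.1, hcond.2]
          simpa using hcont
        rw [if_pos hcond, if_neg (by simp; simpa using hcont)]
        rw [ih temp mv ml nv nl hlen' hinvM hinvN]
        simp [List.filter_cons, hk]
      · have hk : pvKeep a = true := by
          show (decide (x2 < x1) && decide ((y1 - y2).natAbs ≤ 10) && !(a.contains 0)) = true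
          simp [hcond.1, hcond.2]
          simpa using hcont
        have hdiff : pvDiff a = x1 - x2 := rfl
        have hmp : (if mv < x1 - x2 then (if ml ≠ a then (x1 - x2, a) else (mv, ml)) else (mv, ml))
            = mstep (mv, ml) a := by
          unfold mstep
          rcases hinvM with ⟨h1, h2⟩ | ⟨h1, h2⟩
          · have : ml ≠ a := by simp [h1, ha]
            simp [this, hdiff]
          · by_cases hlt : mv < x1 - x2
            · have : ml ≠ a := by
                intro he; rw [he] at h2; rw [hdiff] at h2; omega
              simp [hlt, this, hdiff]
            · simp [hlt, hdiff]
        have hnp : (if x1 - x2 < nv then (if nl ≠ a then (x1 - x2, a) else (nv, nl)) else (nv, nl))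
            = nstep (nv, nl) a := by
          unfold nstep
          rcases hinvN with ⟨h1, h2⟩ | ⟨h1, h2⟩
          · have : nl ≠ a := by simp [h1, ha]
            simp [this, hdiff]
          · by_cases hlt : x1 - x2 < nv
            · have : nl ≠ a := by
                intro he; rw [he] at h2; rw [hdiff] at h2; omega
              simp [hlt, this, hdiff]
            · simp [hlt, hdiff]
        have hinvM' : ((mstep (mv, ml) a).2 = [] ∧ (mstep (mv, ml) a).1 = -10000) ∨
            (pvKeep (mstep (mv, ml) a).2 = true ∧ (mstep (mv, ml) a).1 = pvDiff (mstep (mv, ml) a).2) := by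
          unfold mstep
          by_cases hlt : mv < pvDiff a
          · right; simp [hlt, hk]
          · simpa [hlt] using hinvM
        have hinvN' : ((nstep (nv, nl) a).2 = [] ∧ (nstep (nv, nl) a).1 = 10000) ∨
            (pvKeep (nstep (nv, nl) a).2 = true ∧ (nstep (nv, nl) a).1 = pvDiff (nstep (nv, nl) a).2) := by
          unfold nstep
          by_cases hlt : pvDiff a < nv
          · right; simp [hlt, hk]
          · simpa [hlt] using hinvN
        rw [if_pos hcond, if_pos (by simp; simpa using hcont)]
        rw [hmp, hnp]
        rw [ih (temp ++ [a]) (mstep (mv, ml) a).1 (mstep (mv, ml) a).2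
              (nstep (nv, nl) a).1 (nstep (nv, nl) a).2 hlen' (by simpa using hinvM') (by simpa using hinvN')]
        simp [List.filter_cons, hk]
    · have hk : pvKeep a = false := by
        show (decide (x2 < x1) && decide ((y1 - y2).natAbs ≤ 10) && !(a.contains 0)) = false
        rcases not_and_or.mp hcond with h | h <;> simp [h]
      rw [if_neg hcond]
      rw [ih temp mv ml nv nl hlen' hinvM hinvN]
      simp [List.filter_cons, hk]
theorem main_unchanged (xs : List (List Int)) (hpre : ∀ s ∈ xs, 4 ≤ s.length)
    (hD : ¬ D_analyze_samples xs) : analyze_samples xs = analyze_samples_alt xs := by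
  have hchar := loop_char xs [] (-10000) [] 10000 [] hpre (Or.inl ⟨rfl, rfl⟩) (Or.inl ⟨rfl, rfl⟩)
  unfold analyze_samples analyze_samples_alt
  set kept := xs.filter pvKeep with hkept
  have hkelem : ∀ s ∈ kept, pvKeep s = true := fun s hs => List.of_mem_filter hs
  simp only [hchar, List.nil_append]
  by_cases hlen : kept.length ≤ 2
  · simp [hlen, not_lt.mpr hlen]
  · push_neg at hlen
    rw [if_neg (not_le.mpr hlen), if_pos hlen]
    have hne : kept ≠ [] := by intro h; rw [h] at hlen; simp at hlen
    obtain ⟨h0, t0, hht⟩ : ∃ h t, kept = h :: t := by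
      rcases hex : kept with _ | ⟨h, t⟩
      · exact absurd hex hne
      · exact ⟨h, t, rfl⟩
    have hexmax : ∃ s ∈ kept, (-10000 : Int) < pvDiff s :=
      ⟨h0, by rw [hht]; simp, by have := pvKeep_diff_pos (hkelem h0 (by rw [hht]; simp)); omega⟩
    obtain ⟨m, hmax, hmfold, _⟩ := mstep_fold_of_exists kept (-10000) [] hexmax
    have hmmem : m ∈ kept := PySem.List.max?_mem hmax
    have hrem : PySem.List.remove? kept m = some (kept.erase m) :=
      PySem.List.remove?_eq_some_erase kept m hmmem
    rw [hmfold, hmax]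
    by_cases hex : ∃ s ∈ kept, pvDiff s < 10000
    · obtain ⟨mn, hmin, hnfold, _⟩ := nstep_fold_of_exists kept 10000 [] hex
      rw [hnfold, hmin]
      simp [hrem, hmmem]
    · push_neg at hex
      rw [nstep_fold_of_all kept 10000 [] hex]
      have hD' : ¬ ((∃ s ∈ kept, pvDiff s ≠ pvDiff kept.headI) ∨ 2 ≤ kept.count kept.headI) := by
        intro hor
        exact hD ((D_iff xs).mpr ⟨hlen, hex, hor⟩)
      push_neg at hD'
      obtain ⟨halleq, hcount⟩ := hD'
      have hhead : kept.headI = h0 := by rw [hht]; rfl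
      have halleq' : ∀ s ∈ kept, pvDiff s = pvDiff h0 := by
        intro s hs; have := halleq s hs; rwa [hhead] at this
      have hminh : PySem.List.min? kept pvDiff = some h0 := by
        rw [hht, min?_eq_foldl']
        simp only [List.foldl_cons, minA]
        exact minA_const t0 h0 (fun s hs => le_of_eq (by
          rw [halleq' s (by rw [hht]; simp [hs]), halleq' h0 (by rw [hht]; simp)]))
      have hmaxh : m = h0 := by
        have hx : PySem.List.max? kept pvDiff = some h0 := by
          rw [hht, max?_eq_foldl']
          simp only [List.foldl_cons, maxA]
          exact maxA_const t0 h0 (fun s hs => le_of_eq (by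
            rw [halleq' s (by rw [hht]; simp [hs]), halleq' h0 (by rw [hht]; simp)]))
        have hy := hmax.symm.trans hx
        exact Option.some.injEq _ _ ▸ hy
      subst hmaxh
      rw [hminh]
      have hnilnot : ([] : List Int) ∉ kept.erase m := by
        intro hmem
        have hk := hkelem [] (List.mem_of_mem_erase hmem)
        have hs := pvKeep_shape hk
        simp at hs
      have hcount1 : kept.count m = 1 := by
        have h1 : 1 ≤ kept.count m := List.one_le_count_iff.mpr hmmem
        have h2 := hcount; rw [hhead] at h2; omega
      have hnot : m ∉ kept.erase m := by
        intro hmem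
        have hce : (kept.erase m).count m = kept.count m - 1 := List.count_erase_self
        have h1 : 1 ≤ (kept.erase m).count m := List.one_le_count_iff.mpr hmem
        omega
      simp [hrem, hmmem, hnilnot, hnot]
theorem A_val (xs : List (List Int)) (hpre : ∀ s ∈ xs, 4 ≤ s.length)
    (hlen : 2 < (xs.filter pvKeep).length)
    (hall : ∀ s ∈ xs.filter pvKeep, 10000 ≤ pvDiff s) :
    ∃ m, PySem.List.max? (xs.filter pvKeep) pvDiff = some m ∧
      analyze_samples xs = (xs.filter pvKeep).erase m := by
  have hchar := loop_char xs [] (-10000) [] 10000 [] hpre (Or.inl ⟨rfl, rfl⟩) (Or.inl ⟨rfl, rfl⟩)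
  unfold analyze_samples
  set kept := xs.filter pvKeep with hkept
  have hkelem : ∀ s ∈ kept, pvKeep s = true := fun s hs => List.of_mem_filter hs
  simp only [hchar, List.nil_append]
  have hne : kept ≠ [] := by intro h; rw [h] at hlen; simp at hlen
  obtain ⟨h0, t0, hht⟩ : ∃ h t, kept = h :: t := by
    rcases hx : kept with _ | ⟨h, t⟩
    · exact absurd hx hne
    · exact ⟨h, t, rfl⟩
  have hexmax : ∃ s ∈ kept, (-10000 : Int) < pvDiff s :=
    ⟨h0, by rw [hht]; simp, by have := pvKeep_diff_pos (hkelem h0 (by rw [hht]; simp)); omega⟩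
  obtain ⟨m, hmax, hmfold, _⟩ := mstep_fold_of_exists kept (-10000) [] hexmax
  have hmmem : m ∈ kept := PySem.List.max?_mem hmax
  have hrem : PySem.List.remove? kept m = some (kept.erase m) :=
    PySem.List.remove?_eq_some_erase kept m hmmem
  refine ⟨m, hmax, ?_⟩
  rw [hmfold, nstep_fold_of_all kept 10000 [] hall]
  have hnilnot : ([] : List Int) ∉ kept.erase m := by
    intro hmem
    have hk := hkelem [] (List.mem_of_mem_erase hmem)
    have hs := pvKeep_shape hk
    simp at hs
  rw [if_neg (not_le.mpr hlen)]
  simp [hrem, hmmem, hnilnot]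
theorem B_val (xs : List (List Int)) (m mn : List Int)
    (hlen : 2 < (xs.filter pvKeep).length)
    (hmax : PySem.List.max? (xs.filter pvKeep) pvDiff = some m)
    (hmin : PySem.List.min? (xs.filter pvKeep) pvDiff = some mn)
    (hmem : mn ∈ (xs.filter pvKeep).erase m) :
    analyze_samples_alt xs = ((xs.filter pvKeep).erase m).erase mn := by
  unfold analyze_samples_alt
  set kept := xs.filter pvKeep with hkept
  have hmmem : m ∈ kept := PySem.List.max?_mem hmax
  rw [if_pos hlen, hmax, hmin]
  simp [PySem.List.remove?_eq_some_erase kept m hmmem, hmem,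
    PySem.List.remove?_eq_some_erase (kept.erase m) mn hmem]
theorem main_tight (xs : List (List Int)) (hpre : ∀ s ∈ xs, 4 ≤ s.length)
    (hD : D_analyze_samples xs) : analyze_samples xs ≠ analyze_samples_alt xs := by
  obtain ⟨hlen, hall, hor⟩ := (D_iff xs).mp hD
  set kept := xs.filter pvKeep with hkept
  obtain ⟨m, hmax, hA⟩ := A_val xs hpre hlen hall
  rw [← hkept] at hmax hA
  have hmmem : m ∈ kept := PySem.List.max?_mem hmax
  have hne : kept ≠ [] := by intro h; rw [h] at hlen; simp at hlen
  obtain ⟨h0, t0, hht⟩ : ∃ h t, kept = h :: t := by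
    rcases hx : kept with _ | ⟨h, t⟩
    · exact absurd hx hne
    · exact ⟨h, t, rfl⟩
  obtain ⟨mn, hmin⟩ : ∃ mn, PySem.List.min? kept pvDiff = some mn := by
    rcases hx : PySem.List.min? kept pvDiff with _ | mn
    · exact absurd ((PySem.List.min?_eq_none_iff kept pvDiff).mp hx) hne
    · exact ⟨mn, rfl⟩
  have hhead : kept.headI = h0 := by rw [hht]; rfl
  have hmemmn : mn ∈ kept.erase m := by
    by_cases hexneq : ∃ s ∈ kept, pvDiff s ≠ pvDiff h0
    · obtain ⟨s, hs, hsneq⟩ := hexneq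
      have h1 : pvDiff mn ≤ pvDiff s := PySem.List.min?_isMin hmin s hs
      have h2 : pvDiff mn ≤ pvDiff h0 := PySem.List.min?_isMin hmin h0 (by rw [hht]; simp)
      have h3 : pvDiff s ≤ pvDiff m := PySem.List.max?_isMax hmax s hs
      have h4 : pvDiff h0 ≤ pvDiff m := PySem.List.max?_isMax hmax h0 (by rw [hht]; simp)
      have hne' : mn ≠ m := by
        intro he; rw [he] at h1 h2
        rcases lt_or_gt_of_ne hsneq with h | h <;> omega
      exact List.mem_erase_of_ne hne' |>.mpr (PySem.List.min?_mem hmin)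
    · push_neg at hexneq
      have hcnt : 2 ≤ kept.count h0 := by
        rcases hor with h | h
        · exfalso
          obtain ⟨s, hs, hsneq⟩ := h
          exact hsneq (by rw [hhead]; exact hexneq s hs)
        · rwa [hhead] at h
      have hmh : m = h0 := by
        have hx : PySem.List.max? kept pvDiff = some h0 := by
          rw [hht, max?_eq_foldl']
          simp only [List.foldl_cons, maxA]
          exact maxA_const t0 h0 (fun s hs => le_of_eq (by
            rw [hexneq s (by rw [hht]; simp [hs]), hexneq h0 (by rw [hht]; simp)]))
        have hy := hmax.symm.trans hx
        exact Option.some.injEq _ _ ▸ hy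
      have hmnh : mn = h0 := by
        have hx : PySem.List.min? kept pvDiff = some h0 := by
          rw [hht, min?_eq_foldl']
          simp only [List.foldl_cons, minA]
          exact minA_const t0 h0 (fun s hs => le_of_eq (by
            rw [hexneq s (by rw [hht]; simp [hs]), hexneq h0 (by rw [hht]; simp)]))
        have hy := hmin.symm.trans hx
        exact Option.some.injEq _ _ ▸ hy
      rw [hmh, hmnh]
      have hce : (kept.erase h0).count h0 = kept.count h0 - 1 := List.count_erase_self
      have h1 : 1 ≤ (kept.erase h0).count h0 := by omega
      exact List.one_le_count_iff.mp h1
  have hB := B_val xs m mn hlen (hkept ▸ hmax) hmin hmemmn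
  rw [hA, hB]
  intro heq
  have hlenA := List.length_erase_of_mem hmmem
  have hlenB := List.length_erase_of_mem hmemmn
  have := congrArg List.length heq
  rw [hlenB, hlenA] at this
  omega

-- ===== VERDICT (by name: the statement is the Claim_ definition above) =====
theorem analyze_samples_spec : Claim_unchanged_analyze_samples := by
  intro six_samples _ hpre hD
  exact main_unchanged six_samples hpre hD
theorem analyze_samples_changed : Claim_changed_analyze_samples := by
  unfold Claim_changed_analyze_samples; decide
theorem analyze_samples_tight : Claim_exact_analyze_samples := by
  intro six_samples _ hpre hD
  exact main_tight six_samples hpre hD
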